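-- pv_equiv track=rewrite | github.com/TricolorHen061/bad-word-blocker-archive | v1/badwordblocker.py | sanatize_restructure
-- ===== SOURCE A (Python) =====
-- similar_characters = {
--     "!" : "i",
--     "1" : "i",
--     "@" : "a",
--     "$" : "s",
--
-- }
--
-- bypass_characters = ["!", "@", "#", "$", "%", "^", "&", "*", "(", ")", "-", "_", "+", "=", "{", "[", "}", "]", "\\", "|", ":", ";", "\"", "'", "<", ",", ">", ".", "?", "/"]
--
-- overlapping_characters = ["!", "@", "$", "?"]
--
-- def sanatize_restructure(string):
--     string = string.lower()
--     sanatized_string = []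
--     check = []
--
--     for x in string:
--         if x in bypass_characters:
--             continue
--         sanatized_string.append(x)
--
--     sanatized_string = "".join(sanatized_string)
--     sanatized_string = sanatized_string.split(" ")
--     for w in sanatized_string:
--         check.append(w)
--
--     replace_string = []
--
--
--     for x in string:
--         if x in bypass_characters and x not in overlapping_characters:
--             continue
--         replace_string.append(x)
--
--
--
--     for n, t in enumerate(replace_string):
--         for k, v in similar_characters.items():
--             if k == t:
--                 replace_string[n] = v
--
--     replace_string = "".join(replace_string)
--     replace_string = replace_string.split(" ")
--     for x in replace_string:
--         check.append(x)
--
--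
--
--
--     for n in string.split(" "):
--         check.append(n)
--
--     return check
-- ===== SOURCE B (Python) =====
-- # Single left-to-right scan over the lowered string, maintaining the three
-- # current-word buffers and flushing all three groups whenever a space is seen.
-- _SIM = {"!": "i", "1": "i", "@": "a", "$": "s"}
-- _BYPASS = set("!@#$%^&*()-_+={[}]\\|:;\"'<,>.?/")
-- _NONOVER = _BYPASS - set("!@$?")
--
-- def sanatize_restructure(string):
--     g1, g2, g3 = [], [], []
--     w1, w2, w3 = [], [], []
--     for c in string.lower():
--         if c == " ":
--             g1.append("".join(w1)); g2.append("".join(w2)); g3.append("".join(w3))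
--             w1, w2, w3 = [], [], []
--         else:
--             if c not in _BYPASS:
--                 w1.append(c)
--             if c not in _NONOVER:
--                 w2.append(_SIM.get(c, c))
--             w3.append(c)
--     g1.append("".join(w1)); g2.append("".join(w2)); g3.append("".join(w3))
--     return g1 + g2 + g3
-- ===== Notes on version B (the rewrite author's own statement) =====
-- stated objective: faster
-- what changed: Replaced A's three staged whole-string passes (per-group filter loop, join, split, copy-loop) by a single left-to-right scan that tokenizes on spaces while simultaneously maintaining the three current-word buffers (stripped, look-alike-substituted, raw) and flushing all three groups at each space; set/dict membership replaces A's repeated list scans.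
import Mathlib
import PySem

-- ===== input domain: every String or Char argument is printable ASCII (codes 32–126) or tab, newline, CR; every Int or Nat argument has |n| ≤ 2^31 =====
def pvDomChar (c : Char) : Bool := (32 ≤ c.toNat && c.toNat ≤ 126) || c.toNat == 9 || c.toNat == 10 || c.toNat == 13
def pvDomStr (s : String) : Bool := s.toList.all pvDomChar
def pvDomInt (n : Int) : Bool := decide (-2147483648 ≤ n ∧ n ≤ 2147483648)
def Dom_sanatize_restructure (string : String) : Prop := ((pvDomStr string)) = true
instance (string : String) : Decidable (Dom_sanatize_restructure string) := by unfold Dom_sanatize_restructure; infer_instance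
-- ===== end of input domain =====

-- B replaces A's three staged filter/join/split passes by a single left-to-right scan that tokenizes on spaces while maintaining the three word buffers (measured faster in a timing run).


-- ===== PORT A =====
def similar_characters : List (Char × Char) := [('!', 'i'), ('1', 'i'), ('@', 'a'), ('$', 's')]

def bypass_characters : List Char :=
  ['!', '@', '#', '$', '%', '^', '&', '*', '(', ')', '-', '_', '+', '=', '{', '[', '}', ']',
   '\\', '|', ':', ';', '"', '\'', '<', ',', '>', '.', '?', '/']

def overlapping_characters : List Char := ['!', '@', '$', '?']

def sanatize_restructure (string : String) : List String :=
  let s := PySem.Chars.lower string.toList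
  -- for x in string: if x in bypass_characters: continue; sanatized_string.append(x)
  let sanatized := s.foldl (fun acc x => if x ∈ bypass_characters then acc else acc ++ [x]) []
  -- "".join; .split(" "); for w in sanatized_string: check.append(w)
  let check := (PySem.Chars.splitOn sanatized [' ']).foldl (fun acc w => acc ++ [w]) []
  -- for x in string: if x in bypass and x not in overlapping: continue; replace_string.append(x)
  let replace₀ := s.foldl
    (fun acc x => if x ∈ bypass_characters ∧ x ∉ overlapping_characters then acc else acc ++ [x]) []
  -- for n, t in enumerate(replace_string): for k, v in similar_characters.items(): if k == t: replace_string[n] = v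
  -- (each write hits only index n; t stays the original char, so this is a per-position rewrite)
  let replaced := replace₀.map (fun t => similar_characters.foldl (fun cur kv => if kv.1 = t then kv.2 else cur) t)
  let check := (PySem.Chars.splitOn replaced [' ']).foldl (fun acc x => acc ++ [x]) check
  let check := (PySem.Chars.splitOn s [' ']).foldl (fun acc n => acc ++ [n]) check
  check.map String.ofList

-- ===== PORT B =====
-- _SIM = {"!": "i", "1": "i", "@": "a", "$": "s"}
def pvSim : PySem.Dict Char Char := PySem.Dict.ofList [('!', 'i'), ('1', 'i'), ('@', 'a'), ('$', 's')]

-- _BYPASS = set("!@#$%^&*()-_+={[}]\\|:;\"'<,>.?/")  (distinct elements)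
def pvBypass : List Char :=
  ['!', '@', '#', '$', '%', '^', '&', '*', '(', ')', '-', '_', '+', '=', '{', '[', '}', ']',
   '\\', '|', ':', ';', '"', '\'', '<', ',', '>', '.', '?', '/']

-- _NONOVER = _BYPASS - set("!@$?")
def pvNonOver : List Char := pvBypass.filter (fun c => c ∉ (['!', '@', '$', '?'] : List Char))

-- the single scan of Source B: state = ((g1, w1), (g2, w2), (g3, w3))
def sanatize_restructure_alt (string : String) : List String :=
  let fin := (PySem.Chars.lower string.toList).foldl
    (fun (st : (List (List Char) × List Char) × (List (List Char) × List Char) ×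
               (List (List Char) × List Char)) c =>
      if c = ' ' then
        ((st.1.1 ++ [st.1.2], []), (st.2.1.1 ++ [st.2.1.2], []), (st.2.2.1 ++ [st.2.2.2], []))
      else
        ((st.1.1, if c ∉ pvBypass then st.1.2 ++ [c] else st.1.2),
         (st.2.1.1, if c ∉ pvNonOver then st.2.1.2 ++ [PySem.Dict.getD pvSim c c] else st.2.1.2),
         (st.2.2.1, st.2.2.2 ++ [c])))
    (([], []), ([], []), ([], []))
  ((fin.1.1 ++ [fin.1.2]) ++ (fin.2.1.1 ++ [fin.2.1.2]) ++ (fin.2.2.1 ++ [fin.2.2.2])).map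
    String.ofList

-- ===== PRECONDITION & SPEC =====
def Spec_sanatize_restructure (string : String) (out : List String) : Prop := out = sanatize_restructure_alt string
instance (string : String) (out : List String) : Decidable (Spec_sanatize_restructure string out) := by unfold Spec_sanatize_restructure; infer_instance

-- ===== CLAIM (what is proved, stated in full; the proofs are below) =====
def Claim_equal_sanatize_restructure : Prop := ∀ (string : String), Dom_sanatize_restructure string → Spec_sanatize_restructure string (sanatize_restructure string)

-- ===== LEMMAS AND PROOFS =====

-- delete every bypass character (A's first loop as a filterMap)
def pvDeleteAll (c : Char) : Option Char :=
  if c ∈ bypass_characters then none else some c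

-- delete the non-overlapping bypass characters, map the look-alikes (A's second loop + rewrite)
def pvDeleteMap (c : Char) : Option Char :=
  if c = '!' then some 'i'
  else if c = '1' then some 'i'
  else if c = '@' then some 'a'
  else if c = '$' then some 's'
  else if c ∈ pvNonOver then none
  else some c

-- forward split on ' ' with an open current word (what B's buffers compute)
def pvSplit : List Char → List Char → List (List Char)
  | [], cur => [cur]
  | c :: t, cur => if c = ' ' then cur :: pvSplit t [] else pvSplit t (cur ++ [c])

-- one-group step function: flush on space, otherwise append f c (if kept)
def pvStep (f : Char → Option Char) (st : List (List Char) × List Char) (c : Char) :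
    List (List Char) × List Char :=
  if c = ' ' then (st.1 ++ [st.2], [])
  else match f c with
    | none => st
    | some d => (st.1, st.2 ++ [d])

-- splitOn's worker with enough fuel is pvSplit
lemma pv_go_spec (fuel : Nat) (l cur : List Char) (acc : List (List Char))
    (h : l.length ≤ fuel) :
    PySem.Chars.splitOn.go [' '] fuel l cur acc = acc.reverse ++ pvSplit l cur.reverse := by
  induction fuel generalizing l cur acc with
  | zero =>
    interval_cases hl : l.length
    rw [List.length_eq_zero_iff] at hl
    subst hl
    simp [PySem.Chars.splitOn.go, pvSplit]
  | succ n ih =>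
    cases l with
    | nil => simp [PySem.Chars.splitOn.go, pvSplit]
    | cons c t =>
      simp only [List.length_cons, Nat.succ_le_succ_iff] at h
      by_cases hc : c = ' '
      · subst hc
        rw [PySem.Chars.splitOn.go]
        simp only [List.isPrefixOf, BEq.rfl, Bool.true_and, if_true,
          List.length_cons, List.drop_succ_cons, List.drop_zero, List.length_nil]
        rw [ih t [] _ h]
        simp [pvSplit]
      · rw [PySem.Chars.splitOn.go]
        have : ([' '] : List Char).isPrefixOf (c :: t) = false := by
          simp [List.isPrefixOf]
          exact fun hcontra => hc hcontra.symm
        rw [this]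
        simp only [Bool.false_eq_true, if_false]
        rw [ih t (c :: cur) acc h]
        simp [pvSplit, hc]

-- splitOn on a single space is pvSplit
lemma pv_splitOn_eq (s : List Char) : PySem.Chars.splitOn s [' '] = pvSplit s [] := by
  unfold PySem.Chars.splitOn
  rw [pv_go_spec _ _ _ _ (by omega)]
  simp

-- the one-group scan computes the split of the filtered string
lemma pv_fold_step (f : Char → Option Char) (hf : f ' ' = some ' ')
    (hns : ∀ c d, c ≠ ' ' → f c = some d → d ≠ ' ') (s : List Char) :
    ∀ (g : List (List Char)) (w : List Char),
      (s.foldl (pvStep f) (g, w)).1 ++ [(s.foldl (pvStep f) (g, w)).2]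
        = g ++ pvSplit (s.filterMap f) w := by
  induction s with
  | nil => intro g w; simp [pvSplit]
  | cons c t ih =>
    intro g w
    by_cases hc : c = ' '
    · subst hc
      simp only [List.foldl_cons, pvStep, if_true, List.filterMap_cons, hf, pvSplit]
      rw [ih]
      simp
    · cases hfc : f c with
      | none => simp only [List.foldl_cons, pvStep, hc, if_false, hfc, List.filterMap_cons]
                exact ih g w
      | some d =>
        have hd : d ≠ ' ' := hns c d hc hfc
        simp only [List.foldl_cons, pvStep, hc, if_false, hfc, List.filterMap_cons]
        rw [ih]
        simp [pvSplit, hd]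

-- B's group-1 keep function is A's delete-all filter
lemma pv_f1_eq (c : Char) :
    (if c ∉ pvBypass then some c else none) = pvDeleteAll c := by
  have : (c ∈ pvBypass) ↔ (c ∈ bypass_characters) := by rw [show pvBypass = bypass_characters from rfl]
  by_cases h : c ∈ bypass_characters <;> simp [pvDeleteAll, h, this]

-- B's group-2 keep function is A's delete-nonoverlap + look-alike map
lemma pv_f2_eq (c : Char) :
    (if c ∉ pvNonOver then some (PySem.Dict.getD pvSim c c) else none) = pvDeleteMap c := by
  by_cases h1 : c = '!'; · subst h1; decide
  by_cases h2 : c = '1'; · subst h2; decide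
  by_cases h3 : c = '@'; · subst h3; decide
  by_cases h4 : c = '$'; · subst h4; decide
  by_cases hn : c ∈ pvNonOver
  · simp [pvDeleteMap, h1, h2, h3, h4, hn]
  · have hit : pvSim.items = [('!', 'i'), ('1', 'i'), ('@', 'a'), ('$', 's')] := by decide
    have e1 : (('!' : Char) == c) = false := by simp [Ne.symm h1]
    have e2 : (('1' : Char) == c) = false := by simp [Ne.symm h2]
    have e3 : (('@' : Char) == c) = false := by simp [Ne.symm h3]
    have e4 : (('$' : Char) == c) = false := by simp [Ne.symm h4]
    simp [pvDeleteMap, h1, h2, h3, h4, hn, PySem.Dict.getD, PySem.Dict.get?, hit,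
      List.find?, e1, e2, e3, e4]

-- per character, B's big step is the triple of the three one-group steps
lemma pv_bigstep_eq
    (st : (List (List Char) × List Char) × (List (List Char) × List Char) ×
          (List (List Char) × List Char)) (c : Char) :
    (if c = ' ' then
        ((st.1.1 ++ [st.1.2], []), (st.2.1.1 ++ [st.2.1.2], []), (st.2.2.1 ++ [st.2.2.2], []))
      else
        ((st.1.1, if c ∉ pvBypass then st.1.2 ++ [c] else st.1.2),
         (st.2.1.1, if c ∉ pvNonOver then st.2.1.2 ++ [PySem.Dict.getD pvSim c c] else st.2.1.2),
         (st.2.2.1, st.2.2.2 ++ [c])))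
      = (pvStep pvDeleteAll st.1 c, pvStep pvDeleteMap st.2.1 c, pvStep some st.2.2 c) := by
  by_cases hc : c = ' '
  · simp [pvStep, hc]
  · by_cases hb : c ∈ pvBypass <;> by_cases hn : c ∈ pvNonOver <;>
      simp [pvStep, hc, hb, hn, ← pv_f1_eq, ← pv_f2_eq]

-- the 6-component scan is the triple of the three independent one-group scans
lemma pv_split_state (s : List Char)
    (st : (List (List Char) × List Char) × (List (List Char) × List Char) ×
          (List (List Char) × List Char)) :
    s.foldl
      (fun st c =>
        if c = ' ' then
          ((st.1.1 ++ [st.1.2], []), (st.2.1.1 ++ [st.2.1.2], []), (st.2.2.1 ++ [st.2.2.2], []))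
        else
          ((st.1.1, if c ∉ pvBypass then st.1.2 ++ [c] else st.1.2),
           (st.2.1.1, if c ∉ pvNonOver then st.2.1.2 ++ [PySem.Dict.getD pvSim c c] else st.2.1.2),
           (st.2.2.1, st.2.2.2 ++ [c]))) st
      = (s.foldl (pvStep pvDeleteAll) st.1,
         s.foldl (pvStep pvDeleteMap) st.2.1,
         s.foldl (pvStep some) st.2.2) := by
  induction s generalizing st with
  | nil => rfl
  | cons c t ih =>
    simp only [List.foldl_cons]
    rw [ih, pv_bigstep_eq st c]

-- A's first filter loop is exactly the delete-all table applied by filterMap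
lemma pv_filter_eq_deleteAll (s : List Char) :
    s.foldl (fun acc x => if x ∈ bypass_characters then acc else acc ++ [x]) []
      = s.filterMap pvDeleteAll := by
  suffices h : ∀ init, s.foldl (fun acc x => if x ∈ bypass_characters then acc else acc ++ [x]) init
      = init ++ s.filterMap pvDeleteAll by simpa using h []
  induction s with
  | nil => simp
  | cons c t ih =>
    intro init
    by_cases hc : c ∈ bypass_characters <;>
      simp [List.foldl_cons, hc, ih, pvDeleteAll]

-- per character, A's keep-overlapping filter followed by the look-alike rewrite is pvDeleteMap
lemma pv_step_a (c : Char) :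
    (if c ∈ bypass_characters ∧ c ∉ overlapping_characters then (none : Option Char)
     else some (similar_characters.foldl (fun cur kv => if kv.1 = c then kv.2 else cur) c))
      = pvDeleteMap c := by
  have hno : c ∈ pvNonOver ↔ c ∈ bypass_characters ∧ c ∉ overlapping_characters := by
    simp only [pvNonOver, List.mem_filter, decide_eq_true_eq]
    exact Iff.rfl
  by_cases h1 : c = '!'; · subst h1; decide
  by_cases h2 : c = '1'; · subst h2; decide
  by_cases h3 : c = '@'; · subst h3; decide
  by_cases h4 : c = '$'; · subst h4; decide
  by_cases hb : c ∈ bypass_characters ∧ c ∉ overlapping_characters <;>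
    simp [hb, pvDeleteMap, h1, h2, h3, h4, similar_characters, List.foldl_cons, List.foldl_nil,
      Ne.symm h1, Ne.symm h2, Ne.symm h3, Ne.symm h4, hno]

-- A's keep-overlapping filter followed by the look-alike rewrite is pvDeleteMap by filterMap
lemma pv_replace_eq_deleteMap (s : List Char) :
    (s.foldl (fun acc x => if x ∈ bypass_characters ∧ x ∉ overlapping_characters then acc else acc ++ [x]) []).map
        (fun t => similar_characters.foldl (fun cur kv => if kv.1 = t then kv.2 else cur) t)
      = s.filterMap pvDeleteMap := by
  suffices h : ∀ init, (s.foldl (fun acc x => if x ∈ bypass_characters ∧ x ∉ overlapping_characters then acc else acc ++ [x]) init).map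
        (fun t => similar_characters.foldl (fun cur kv => if kv.1 = t then kv.2 else cur) t)
      = init.map (fun t => similar_characters.foldl (fun cur kv => if kv.1 = t then kv.2 else cur) t)
        ++ s.filterMap pvDeleteMap by simpa using h []
  induction s with
  | nil => simp
  | cons c t ih =>
    intro init
    have hs := pv_step_a c
    by_cases hc : c ∈ bypass_characters ∧ c ∉ overlapping_characters
    · simp [hc] at hs
      simp [List.foldl_cons, hc, ih, ← hs]
    · simp [hc] at hs
      simp [List.foldl_cons, hc, ih, ← hs]

-- side conditions of pv_fold_step for the three keep functions
lemma pv_da_space : pvDeleteAll ' ' = some ' ' := by decide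
lemma pv_da_ns : ∀ c d, c ≠ ' ' → pvDeleteAll c = some d → d ≠ ' ' := by
  intro c d hc h
  unfold pvDeleteAll at h
  by_cases hb : c ∈ bypass_characters
  · simp [hb] at h
  · simp [hb] at h; subst h; exact hc
lemma pv_dm_space : pvDeleteMap ' ' = some ' ' := by decide
lemma pv_dm_ns : ∀ c d, c ≠ ' ' → pvDeleteMap c = some d → d ≠ ' ' := by
  intro c d hc h
  unfold pvDeleteMap at h
  split_ifs at h with h1 h2 h3 h4 h5
  · simp at h; subst h; decide
  · simp at h; subst h; decide
  · simp at h; subst h; decide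
  · simp at h; subst h; decide
  · simp at h; subst h; exact hc
lemma pv_some_ns : ∀ c d, c ≠ ' ' → (some c : Option Char) = some d → d ≠ ' ' := by
  intro c d hc h; cases h; exact hc

-- ===== VERDICT (by name: the statement is the Claim_ definition above) =====
theorem sanatize_restructure_spec : Claim_equal_sanatize_restructure := by
  intro string _
  show sanatize_restructure string = sanatize_restructure_alt string
  unfold sanatize_restructure sanatize_restructure_alt
  simp only [PySem.List.foldl_append_singleton, List.nil_append]
  rw [pv_split_state]
  rw [pv_fold_step pvDeleteAll pv_da_space pv_da_ns,
      pv_fold_step pvDeleteMap pv_dm_space pv_dm_ns,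
      pv_fold_step some rfl pv_some_ns]
  simp only [List.filterMap_some, List.nil_append]
  rw [pv_filter_eq_deleteAll, pv_replace_eq_deleteMap]
  simp [pv_splitOn_eq, List.append_assoc]
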